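-- pv_equiv track=rewrite | github.com/mustafaansarii/dp | Questions/Arrays/max_0.py | calculateMaxZeroes
-- ===== SOURCE A (Python) =====
-- def calculateMaxZeroes(n, sequenceData):
--     zero_count = 0
--
--     while True:
--         # Find the longest prefix without any zero
--         prefix_end = 0
--         while prefix_end < n and sequenceData[prefix_end] != 0:
--             prefix_end += 1
--
--         if prefix_end == 0:
--             # No valid prefix found
--             break
--
--         # Find the minimum value in this prefix
--         min_val = min(sequenceData[:prefix_end])
--
--         # Subtract min_val from all elements in the prefix
--         for i in range(prefix_end):
--             sequenceData[i] -= min_val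
--             if sequenceData[i] == 0:
--                 zero_count += 1
--
--     return zero_count
-- ===== SOURCE B (Python) =====
-- def calculateMaxZeroes(n, sequenceData):
--     # One pass: an element becomes zero in A's process exactly when it is a
--     # (non-strict) running prefix minimum of the nonzero prefix clipped to n.
--     count = 0
--     cur_min = None
--     for i, v in enumerate(sequenceData):
--         if i >= n or v == 0:
--             break
--         if cur_min is None or v <= cur_min:
--             count += 1
--             cur_min = v
--     return count
-- ===== Notes on version B (the rewrite author's own statement) =====
-- stated objective: faster
-- what changed: Replaces A's repeated subtract-prefix-min rounds (rescanning, re-min-ing and rewriting the prefix each round) with a single left-to-right pass that counts running prefix minima of the nonzero prefix clipped to n, which is exactly the number of zeros A's process creates.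
import Mathlib
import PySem

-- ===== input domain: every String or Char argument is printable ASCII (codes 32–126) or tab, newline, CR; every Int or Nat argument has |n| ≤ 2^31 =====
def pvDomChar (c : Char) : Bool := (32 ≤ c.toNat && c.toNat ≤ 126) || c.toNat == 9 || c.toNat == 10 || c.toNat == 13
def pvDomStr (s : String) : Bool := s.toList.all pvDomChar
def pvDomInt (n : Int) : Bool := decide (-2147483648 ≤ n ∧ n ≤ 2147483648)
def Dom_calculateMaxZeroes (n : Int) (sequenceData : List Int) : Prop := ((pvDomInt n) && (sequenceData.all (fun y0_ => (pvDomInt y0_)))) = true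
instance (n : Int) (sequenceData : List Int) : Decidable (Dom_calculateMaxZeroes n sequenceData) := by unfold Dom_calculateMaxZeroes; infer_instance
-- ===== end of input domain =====

-- B replaces A's repeated subtract-prefix-min rounds with one left-to-right pass counting
-- running prefix minima; equivalence is about the RETURN value only (A mutates sequenceData in place, B does not).

-- ===== PORT A =====
-- inner 'while prefix_end < n and sequenceData[prefix_end] != 0'; the range check that Python's
-- indexing performs (IndexError when prefix_end ≥ len, excluded by Pre_) totalizes the loop here.
def pvScanA (n : Int) (a : List Int) (i : Nat) : Nat :=
  if h : i < a.length ∧ (i : Int) < n then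
    if a[i]'h.1 ≠ 0 then pvScanA n a (i + 1) else i
  else i
termination_by a.length - i
decreasing_by omega

-- 'for i in range(prefix_end): sequenceData[i] -= min_val; if sequenceData[i] == 0: zero_count += 1'
def pvSubCountA (m : Int) (l : List Int) (z : Int) : List Int × Int :=
  l.foldl (fun acc v => (acc.1 ++ [v - m], if v - m = 0 then acc.2 + 1 else acc.2)) ([], z)

-- the outer 'while True'; fuel = length + 1 suffices because prefix_end strictly decreases.
def pvOuterA (n : Int) (fuel : Nat) (a : List Int) (z : Int) : Int :=
  match fuel with
  | 0 => z
  | fuel + 1 =>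
    let pe := pvScanA n a 0
    if pe = 0 then z
    else
      let m := (PySem.List.min? (PySem.List.slice a none (some (pe : Int))) (fun x => x)).getD 0
      let r := pvSubCountA m (a.take pe) z
      pvOuterA n fuel (r.1 ++ a.drop pe) r.2

def calculateMaxZeroes (n : Int) (sequenceData : List Int) : Int :=
  pvOuterA n (sequenceData.length + 1) sequenceData 0

-- ===== PORT B =====
def pvLoopB (n : Int) (i : Nat) (xs : List Int) (cnt : Int) (cm : Option Int) : Int :=
  match xs with
  | [] => cnt
  | v :: rest =>
    if n ≤ (i : Int) ∨ v = 0 then cnt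
    else
      match cm with
      | none => pvLoopB n (i + 1) rest (cnt + 1) (some v)
      | some m => if v ≤ m then pvLoopB n (i + 1) rest (cnt + 1) (some v)
                  else pvLoopB n (i + 1) rest cnt (some m)

def calculateMaxZeroes_alt (n : Int) (sequenceData : List Int) : Int :=
  pvLoopB n 0 sequenceData 0 none

-- ===== PRECONDITION & SPEC =====
-- Pre_ excludes exactly the inputs where A raises IndexError: n beyond the end of a zero-free list.
def Pre_calculateMaxZeroes (n : Int) (sequenceData : List Int) : Prop :=
  n ≤ (sequenceData.length : Int) ∨ (0 : Int) ∈ sequenceData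
instance (n : Int) (sequenceData : List Int) : Decidable (Pre_calculateMaxZeroes n sequenceData) := by
  unfold Pre_calculateMaxZeroes; infer_instance

def pvWitness_calculateMaxZeroes : Int × List Int := (3, [2, 1, 2])

def Spec_calculateMaxZeroes (n : Int) (sequenceData : List Int) (out : Int) : Prop := out = calculateMaxZeroes_alt n sequenceData
instance (n : Int) (sequenceData : List Int) (out : Int) : Decidable (Spec_calculateMaxZeroes n sequenceData out) := by unfold Spec_calculateMaxZeroes; infer_instance

-- ===== CLAIM (what is proved, stated in full; the proofs are below) =====
def Claim_equal_calculateMaxZeroes : Prop := ∀ (n : Int) (sequenceData : List Int), Dom_calculateMaxZeroes n sequenceData → Pre_calculateMaxZeroes n sequenceData → Spec_calculateMaxZeroes n sequenceData (calculateMaxZeroes n sequenceData)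
-- ===== LEMMAS AND PROOFS =====

-- reference function: count of running (non-strict) prefix minima, with accumulator cm
def pvCpm (cm : Option Int) (l : List Int) : Int :=
  match l with
  | [] => 0
  | v :: rest =>
    match cm with
    | none => 1 + pvCpm (some v) rest
    | some m => if v ≤ m then 1 + pvCpm (some v) rest else pvCpm (some m) rest

def pvRunMin (cm : Option Int) (l : List Int) : Option Int :=
  match l with
  | [] => cm
  | v :: rest => pvRunMin (match cm with | none => some v | some m => some (min m v)) rest

def pvSeg (n : Int) (a : List Int) : List Int := (a.take n.toNat).takeWhile (· ≠ 0)

-- B's loop computes pvCpm of the clipped nonzero prefix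
theorem pvLoopB_eq (n : Int) : ∀ (xs : List Int) (i : Nat) (cnt : Int) (cm : Option Int),
    pvLoopB n i xs cnt cm = cnt + pvCpm cm ((xs.take (n - i).toNat).takeWhile (· ≠ 0)) := by
  intro xs
  induction xs with
  | nil => intro i cnt cm; simp [pvLoopB, pvCpm]
  | cons v rest ih =>
    intro i cnt cm
    simp only [pvLoopB]
    by_cases h : n ≤ (i : Int) ∨ v = 0
    · rw [if_pos h]
      rcases h with h | h
      · have h0 : (n - (i : Int)).toNat = 0 := by omega
        simp [h0, pvCpm]
      · rcases Nat.eq_zero_or_pos (n - (i : Int)).toNat with h0 | h0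
        · simp [h0, pvCpm]
        · obtain ⟨k, hk⟩ : ∃ k, (n - (i : Int)).toNat = k + 1 :=
            ⟨_, (Nat.succ_pred_eq_of_pos h0).symm⟩
          simp [hk, h, pvCpm]
    · rw [if_neg h]
      obtain ⟨h1, h2⟩ := not_or.mp h
      have hk : (n - (i : Int)).toNat = (n - ((i + 1 : Nat) : Int)).toNat + 1 := by
        push_cast; omega
      rw [hk]
      rw [List.take_succ_cons, List.takeWhile_cons_of_pos (by simp [h2])]
      cases cm with
      | none => rw [ih]; simp [pvCpm]; ring
      | some m =>
        dsimp only
        by_cases hv : v ≤ m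
        · rw [if_pos hv, ih]; simp [pvCpm, hv]; ring
        · rw [if_neg hv, ih]; simp [pvCpm, hv]

-- A's scan computes the length of the clipped nonzero prefix
theorem pvScanA_eq (n : Int) (a : List Int) : ∀ (k i : Nat), a.length - i ≤ k →
    pvScanA n a i = i + (((a.drop i).take (n - i).toNat).takeWhile (· ≠ 0)).length := by
  intro k
  induction k with
  | zero =>
    intro i hle
    rw [pvScanA]
    have hni : ¬ (i < a.length ∧ (i : Int) < n) := by omega
    rw [dif_neg hni]
    have hd : a.drop i = [] := List.drop_eq_nil_of_le (by omega)
    simp [hd]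
  | succ k ih =>
    intro i hle
    rw [pvScanA]
    by_cases h : i < a.length ∧ (i : Int) < n
    · rw [dif_pos h]
      have hdrop : a.drop i = a[i]'h.1 :: a.drop (i + 1) := List.drop_eq_getElem_cons h.1
      have hk : (n - (i : Int)).toNat = (n - ((i + 1 : Nat) : Int)).toNat + 1 := by
        push_cast; omega
      by_cases hz : a[i]'h.1 ≠ 0
      · rw [if_pos hz, ih (i + 1) (by omega)]
        rw [hdrop, hk, List.take_succ_cons, List.takeWhile_cons_of_pos (by simp [hz])]
        simp; omega
      · rw [if_neg hz]
        rw [hdrop, hk, List.take_succ_cons,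
          List.takeWhile_cons_of_neg (by simpa using hz)]
        simp
    · rw [dif_neg h]
      by_cases hl : i < a.length
      · have hn0 : (n - (i : Int)).toNat = 0 := by omega
        simp [hn0]
      · have hd : a.drop i = [] := List.drop_eq_nil_of_le (by omega)
        simp [hd]

-- A's subtract-and-count pass
theorem pvSubCountA_eq (m : Int) : ∀ (l : List Int) (p : List Int) (z : Int),
    l.foldl (fun acc v => (acc.1 ++ [v - m], if v - m = 0 then acc.2 + 1 else acc.2)) (p, z)
    = (p ++ l.map (· - m), z + (l.count m : Int)) := by
  intro l
  induction l with
  | nil => intro p z; simp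
  | cons v rest ih =>
    intro p z
    rw [List.foldl_cons]
    dsimp only
    rw [ih]
    simp only [Prod.mk.injEq, List.map_cons, List.count_cons, List.append_assoc,
      List.singleton_append, beq_iff_eq]
    refine ⟨trivial, ?_⟩
    push_cast
    split_ifs <;> omega

theorem pvCpm_append (q : List Int) : ∀ (p : List Int) (cm : Option Int),
    pvCpm cm (p ++ q) = pvCpm cm p + pvCpm (pvRunMin cm p) q := by
  intro p
  induction p with
  | nil => intro cm; simp [pvCpm, pvRunMin]
  | cons v rest ih =>
    intro cm
    cases cm with
    | none => simp only [List.cons_append, pvCpm, pvRunMin, ih]; ring_nf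
    | some m =>
      by_cases hv : v ≤ m
      · simp only [List.cons_append, pvCpm, pvRunMin, if_pos hv, ih,
          min_eq_right hv]
        ring
      · simp only [List.cons_append, pvCpm, pvRunMin, if_neg hv, ih,
          min_eq_left (by omega : m ≤ v)]

theorem pvRunMin_gt (m : Int) : ∀ (p : List Int) (cm : Option Int),
    (∀ x ∈ p, m < x) → (cm = none ∨ ∃ c, cm = some c ∧ m < c) →
    (pvRunMin cm p = none ∨ ∃ c, pvRunMin cm p = some c ∧ m < c) := by
  intro p
  induction p with
  | nil => intro cm _ hcm; simpa [pvRunMin] using hcm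
  | cons v rest ih =>
    intro cm hp hcm
    have hv : m < v := hp v (by simp)
    simp only [pvRunMin]
    cases cm with
    | none =>
      exact ih _ (fun x hx => hp x (by simp [hx])) (Or.inr ⟨v, rfl, hv⟩)
    | some c =>
      rcases hcm with h | ⟨c', hc', hm⟩
      · cases h
      · have hcc : c' = c := by injection hc' with h'; exact h'.symm
        subst hcc
        exact ih _ (fun x hx => hp x (by simp [hx]))
          (Or.inr ⟨min c' v, rfl, lt_min hm hv⟩)

theorem pvCpm_const (m : Int) : ∀ (q : List Int), (∀ x ∈ q, m ≤ x) →
    pvCpm (some m) q = (q.count m : Int) := by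
  intro q
  induction q with
  | nil => intro _; simp [pvCpm]
  | cons v rest ih =>
    intro hq
    have hv : m ≤ v := hq v (by simp)
    simp only [pvCpm]
    by_cases h : v ≤ m
    · obtain rfl : v = m := le_antisymm h hv
      rw [if_pos le_rfl, ih (fun x hx => hq x (by simp [hx]))]
      simp
      omega
    · rw [if_neg h, ih (fun x hx => hq x (by simp [hx]))]
      have hne : (v == m) = false := beq_eq_false_iff_ne.mpr (fun e => h (e ▸ le_rfl))
      rw [List.count_cons, hne]
      simp

theorem pvCpm_shift (m : Int) : ∀ (l : List Int) (cm : Option Int),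
    pvCpm (cm.map (· - m)) (l.map (· - m)) = pvCpm cm l := by
  intro l
  induction l with
  | nil => intro cm; simp [pvCpm]
  | cons v rest ih =>
    intro cm
    cases cm with
    | none => simpa [pvCpm] using ih (some v)
    | some c =>
      by_cases hv : v ≤ c
      · have : v - m ≤ c - m := by omega
        simpa [pvCpm, hv, this] using ih (some v)
      · have : ¬ v - m ≤ c - m := by omega
        simpa [pvCpm, hv, this] using ih (some c)

-- key decomposition: one round of A removes count-of-min and leaves the part before the leftmost min
theorem pvCpm_key (m : Int) (s : List Int) (hmem : m ∈ s) (hmin : ∀ x ∈ s, m ≤ x) :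
    pvCpm none s = (s.count m : Int) + pvCpm none (s.takeWhile (· ≠ m)) := by
  have hdec : ∀ l : List Int, m ∈ l → ∃ t, l = l.takeWhile (· ≠ m) ++ m :: t := by
    intro l hl
    induction l with
    | nil => cases hl
    | cons v rest ih =>
      by_cases hv : v = m
      · subst hv
        exact ⟨rest, by simp⟩
      · obtain ⟨t, ht⟩ := ih (by
          rcases List.mem_cons.mp hl with h | h
          · exact absurd h.symm hv
          · exact h)
        refine ⟨t, ?_⟩
        rw [List.takeWhile_cons_of_pos (by simp [hv])]
        rw [List.cons_append, ← ht]
  obtain ⟨t, hts⟩ := hdec s hmem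
  have hgt : ∀ x ∈ s.takeWhile (· ≠ m), m < x := by
    intro x hx
    have hxs : x ∈ s := (List.takeWhile_sublist _).subset hx
    have hxm : x ≠ m := by simpa using List.mem_takeWhile_imp hx
    exact lt_of_le_of_ne (hmin x hxs) (Ne.symm hxm)
  have hrm := pvRunMin_gt m (s.takeWhile (· ≠ m)) none hgt (Or.inl rfl)
  have hpcount : (s.takeWhile (· ≠ m)).count m = 0 := by
    rw [List.count_eq_zero]
    intro hmp
    exact absurd (List.mem_takeWhile_imp hmp) (by simp)
  have hcount : (s.count m : Int) = 1 + (t.count m : Int) := by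
    conv_lhs => rw [hts]
    rw [List.count_append, hpcount]
    simp
    omega
  have hconst : pvCpm (some m) t = (t.count m : Int) :=
    pvCpm_const m t (fun x hx => hmin x (by
      rw [hts]; exact List.mem_append.mpr (Or.inr (List.mem_cons_of_mem m hx))))
  have hmid : pvCpm (pvRunMin none (s.takeWhile (· ≠ m))) (m :: t)
      = 1 + pvCpm (some m) t := by
    rcases hrm with h | ⟨c, hc, hmc⟩
    · simp only [h, pvCpm]
    · simp only [hc, pvCpm, if_pos (le_of_lt hmc)]
  have hmain : pvCpm none s = pvCpm none (s.takeWhile (· ≠ m)) + (1 + (t.count m : Int)) := by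
    conv_lhs => rw [hts]
    rw [pvCpm_append, hmid, hconst]
  rw [hmain, hcount]
  ring

theorem pvTakeWhileAppend (p : Int → Bool) (r : List Int) : ∀ l : List Int,
    (∃ x ∈ l, p x = false) → (l ++ r).takeWhile p = l.takeWhile p := by
  intro l
  induction l with
  | nil => rintro ⟨x, hx, _⟩; cases hx
  | cons v rest ih =>
    rintro ⟨x, hx, hpx⟩
    by_cases hv : p v = true
    · rw [List.cons_append, List.takeWhile_cons_of_pos hv, List.takeWhile_cons_of_pos hv]
      rcases List.mem_cons.mp hx with rfl | hx'
      · rw [hv] at hpx; cases hpx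
      · rw [ih ⟨x, hx', hpx⟩]
    · rw [List.cons_append, List.takeWhile_cons_of_neg hv, List.takeWhile_cons_of_neg hv]

theorem pvSegStep (m : Int) (s r : List Int) (K : Nat) (hK : s.length ≤ K) (hmem : m ∈ s) :
    ((s.map (· - m) ++ r).take K).takeWhile (· ≠ 0) = (s.takeWhile (· ≠ m)).map (· - m) := by
  have hz : ∃ x ∈ s.map (· - m), (decide (x ≠ 0)) = false :=
    ⟨0, List.mem_map.mpr ⟨m, hmem, sub_self m⟩, by simp⟩
  rw [List.take_append, List.take_of_length_le (by simpa using hK),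
      pvTakeWhileAppend _ _ _ hz, List.takeWhile_map]
  have hpred : ((fun x => decide (x ≠ 0)) ∘ fun x => x - m) = (fun x => decide (x ≠ m)) := by
    funext x; simp [sub_eq_zero]
  rw [hpred]

theorem pvOuterA_eq (n : Int) : ∀ (fuel : Nat) (a : List Int) (z : Int),
    (pvSeg n a).length ≤ fuel → pvOuterA n fuel a z = z + pvCpm none (pvSeg n a) := by
  intro fuel
  induction fuel with
  | zero =>
    intro a z hle
    have h0 : pvSeg n a = [] := List.eq_nil_of_length_eq_zero (by omega)
    simp [pvOuterA, h0, pvCpm]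
  | succ fuel ih =>
    intro a z hle
    have hscan : pvScanA n a 0 = (pvSeg n a).length := by
      have h := pvScanA_eq n a a.length 0 (by omega)
      simpa [pvSeg] using h
    by_cases hpe : pvScanA n a 0 = 0
    · have hseg : pvSeg n a = [] :=
        List.eq_nil_of_length_eq_zero (by omega)
      simp [pvOuterA, hpe, hseg, pvCpm]
    · -- the segment s is nonempty
      have hsne : pvSeg n a ≠ [] := by
        intro h; rw [h] at hscan; simp at hscan; exact hpe hscan
      -- s is a prefix of a
      have hpref : a.take (pvSeg n a).length = pvSeg n a := by
        have h1 : pvSeg n a <+: a :=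
          (List.takeWhile_prefix _).trans (List.take_prefix _ _)
        exact (List.prefix_iff_eq_take.mp h1).symm
      -- the minimum of the segment
      obtain ⟨m, hm⟩ : ∃ m, PySem.List.min? (pvSeg n a) (fun x => x) = some m := by
        cases hmo : PySem.List.min? (pvSeg n a) (fun x => x) with
        | none => exact absurd ((PySem.List.min?_eq_none_iff _ _).mp hmo) hsne
        | some m => exact ⟨m, rfl⟩
      have hmem : m ∈ pvSeg n a := PySem.List.min?_mem hm
      have hmin : ∀ x ∈ pvSeg n a, m ≤ x := PySem.List.min?_isMin hm
      -- one step of the outer loop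
      simp only [pvOuterA, hscan, if_neg (fun h => hsne (List.eq_nil_of_length_eq_zero h))]
      rw [PySem.List.slice_to_natCast, hpref]
      rw [show (PySem.List.min? (pvSeg n a) (fun x => x)).getD 0 = m by rw [hm]; rfl]
      unfold pvSubCountA
      rw [pvSubCountA_eq]
      simp only [List.nil_append]
      -- the new list and its segment
      have hK : (pvSeg n a).length ≤ n.toNat := by
        have h1 := (List.takeWhile_prefix (l := a.take n.toNat) (p := (· ≠ 0))).length_le
        have h2 := a.length_take (i := n.toNat)
        unfold pvSeg at *; omega
      have hseg1 : pvSeg n ((pvSeg n a).map (· - m) ++ a.drop (pvSeg n a).length)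
          = ((pvSeg n a).takeWhile (· ≠ m)).map (· - m) :=
        pvSegStep m (pvSeg n a) _ n.toNat hK hmem
      have hlt : ((pvSeg n a).takeWhile (· ≠ m)).length < (pvSeg n a).length := by
        have hle' := (List.takeWhile_prefix (l := pvSeg n a) (p := (· ≠ m))).length_le
        rcases lt_or_eq_of_le hle' with h | h
        · exact h
        · exfalso
          have heq : (pvSeg n a).takeWhile (· ≠ m) = pvSeg n a :=
            List.IsPrefix.eq_of_length (List.takeWhile_prefix _) h
          have hmm := List.mem_takeWhile_imp (l := pvSeg n a) (p := (· ≠ m))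
            (by rw [heq]; exact hmem)
          simp at hmm
      rw [ih _ _ (by rw [hseg1]; simp only [List.length_map]; omega)]
      rw [hseg1]
      have hshift := pvCpm_shift m ((pvSeg n a).takeWhile (· ≠ m)) none
      simp only [Option.map_none] at hshift
      rw [hshift, pvCpm_key m (pvSeg n a) hmem hmin]
      ring

-- ===== VERDICT (by name: the statement is the Claim_ definition above) =====
theorem calculateMaxZeroes_spec : Claim_equal_calculateMaxZeroes := by
  intro n a _ _
  unfold Spec_calculateMaxZeroes calculateMaxZeroes calculateMaxZeroes_alt
  rw [pvOuterA_eq n (a.length + 1) a 0 (by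
        have h1 := (List.takeWhile_prefix (l := a.take n.toNat) (p := (· ≠ 0))).length_le
        have h2 := a.length_take (i := n.toNat)
        unfold pvSeg; omega),
      pvLoopB_eq n a 0 0 none]
  simp [pvSeg]
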